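-- pv_equiv track=rewrite | github.com/Alita4195/helsinki-uni-python-Mooc- | part05-06_sudoku_block/src/sudoku_block.py | sudoku_grid_correct
-- ===== SOURCE A (Python) =====
-- def sudoku_grid_correct(sudoku: list):
--
--     index=0
--     while index<=6:
--         check_numbers=[]
--         for i in range(index,index+3):
--             for j in range(index,index+3):
--                 if sudoku[i][j] in check_numbers and sudoku[i][j]!=0:
--                     return False
--                 check_numbers.append(sudoku[i][j])
--         index+=3
--
--     return True
-- ===== SOURCE B (Python) =====
-- def sudoku_grid_correct(sudoku: list):
--     coords = [(i, j, b)
--               for b in range(3)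
--               for i in range(3 * b, 3 * b + 3)
--               for j in range(3 * b, 3 * b + 3)]
--
--     def walk(rest, seen):
--         if not rest:
--             return True
--         i, j, b = rest[0]
--         v = sudoku[i][j]
--         if v != 0 and (b, v) in seen:
--             return False
--         return walk(rest[1:], seen | {(b, v)} if v != 0 else seen)
--
--     return walk(coords, frozenset())
-- ===== Notes on version B (the rewrite author's own statement) =====
-- stated objective: alternative
-- what changed: Replaces A's while loop over blocks with nested for loops, a per-block check_numbers list and a per-cell list-membership test by a precomputed flat coordinate list walked recursively with one global frozenset of (block, value) tags and no per-block state reset.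
import Mathlib
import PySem

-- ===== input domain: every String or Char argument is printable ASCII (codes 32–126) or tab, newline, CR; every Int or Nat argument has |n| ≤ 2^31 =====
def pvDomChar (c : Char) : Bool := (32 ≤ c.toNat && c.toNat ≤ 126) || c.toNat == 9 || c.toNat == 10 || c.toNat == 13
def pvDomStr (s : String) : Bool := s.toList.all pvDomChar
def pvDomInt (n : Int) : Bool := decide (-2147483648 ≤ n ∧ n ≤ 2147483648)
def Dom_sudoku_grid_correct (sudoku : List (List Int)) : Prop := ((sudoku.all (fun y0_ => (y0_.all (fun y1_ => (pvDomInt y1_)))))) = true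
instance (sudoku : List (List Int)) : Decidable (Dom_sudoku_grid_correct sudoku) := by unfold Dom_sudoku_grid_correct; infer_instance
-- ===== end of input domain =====

-- B flattens the three diagonal blocks into one precomputed coordinate list and walks it
-- by recursion with a single global frozenset of (block, value) tags, instead of A's while
-- loop with nested for loops, a per-block list accumulator and a list-membership test
-- (objective: alternative).

-- ===== PORT A =====
-- sudoku[i][j]; in range whenever Python A evaluates it under Pre_, so the total pyGetD form is exact there
def pvCellA (sudoku : List (List Int)) (i j : Int) : Int :=
  PySem.List.pyGetD (PySem.List.pyGetD sudoku i []) j 0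

-- body of the inner 'for j' loop; state = none once 'return False' has fired
def pvStepA (sudoku : List (List Int)) (i : Int) (st : Option (List Int)) (j : Int) : Option (List Int) :=
  st.bind (fun check_numbers =>
    if pvCellA sudoku i j ∈ check_numbers ∧ pvCellA sudoku i j ≠ 0 then none
    else some (check_numbers ++ [pvCellA sudoku i j]))

-- one iteration of the while body: check_numbers = [], then the two nested for loops
def pvBlockA (sudoku : List (List Int)) (index : Int) : Option (List Int) :=
  (PySem.List.pyRange index (index + 3) 1).foldl
    (fun st i => (PySem.List.pyRange index (index + 3) 1).foldl (pvStepA sudoku i) st)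
    (some [])

-- the 'while index <= 6' loop; none from a block = 'return False'
def pvWhileA (sudoku : List (List Int)) (index : Int) : Bool :=
  if index ≤ 6 then
    match pvBlockA sudoku index with
    | none => false
    | some _ => pvWhileA sudoku (index + 3)
  else true
termination_by (7 - index).toNat
decreasing_by omega

def sudoku_grid_correct (sudoku : List (List Int)) : Bool := pvWhileA sudoku 0

-- ===== PORT B =====
-- coords = [(i, j, b) for b in range(3) for i in range(3*b, 3*b+3) for j in range(3*b, 3*b+3)]
def pvCoordsB : List (Int × Int × Int) :=
  (PySem.List.pyRange 0 3 1).flatMap (fun b =>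
    (PySem.List.pyRange (3 * b) (3 * b + 3) 1).flatMap (fun i =>
      (PySem.List.pyRange (3 * b) (3 * b + 3) 1).map (fun j => (i, j, b))))

-- walk(rest, seen); sudoku[i][j] is in range whenever Python B evaluates it under Pre_,
-- so the total pyGetD form is exact there
def pvWalkB (sudoku : List (List Int)) : List (Int × Int × Int) → PySem.Set (Int × Int) → Bool
  | [], _ => true
  | (i, j, b) :: rest, seen =>
    let v := PySem.List.pyGetD (PySem.List.pyGetD sudoku i []) j 0
    if v ≠ 0 ∧ PySem.Set.contains seen (b, v) then false
    else pvWalkB sudoku rest (if v ≠ 0 then PySem.Set.union seen (PySem.Set.ofList [(b, v)]) else seen)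

def sudoku_grid_correct_alt (sudoku : List (List Int)) : Bool :=
  pvWalkB sudoku pvCoordsB PySem.Set.empty

-- ===== PRECONDITION & SPEC =====
-- sudoku[i][j] if both indices are in range, else none (an IndexError in Python A)
def pvCell? (sudoku : List (List Int)) (i j : Nat) : Option Int :=
  (sudoku[i]?).bind (fun row => row[j]?)

-- the block starting at (n, n), in A's row-major scan order, cell by cell
def pvBlockOpts (sudoku : List (List Int)) (n : Nat) : List (Option Int) :=
  (List.range 3).flatMap (fun di => (List.range 3).map (fun dj => pvCell? sudoku (n + di) (n + dj)))

-- all nine cells of the block exist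
def pvPresent (sudoku : List (List Int)) (n : Nat) : Prop :=
  ∀ o ∈ pvBlockOpts sudoku n, o.isSome
-- the (fully present) block has no repeated non-zero value
def pvCleanFull (sudoku : List (List Int)) (n : Nat) : Prop :=
  (((pvBlockOpts sudoku n).filterMap id).filter (fun v => v != 0)).Nodup
-- a repeated non-zero value occurs among the cells scanned before the first missing cell
def pvDupBefore (sudoku : List (List Int)) (n : Nat) : Prop :=
  ¬ ((((pvBlockOpts sudoku n).takeWhile Option.isSome).filterMap id).filter (fun v => v != 0)).Nodup

-- Pre_ = exactly the inputs on which Python A returns (True or False) instead of raising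
-- IndexError: every block A actually reaches (all earlier blocks fully present and
-- duplicate-free) is either fully present, or shows a repeated non-zero value before its
-- first missing cell (so A returns False there before touching the missing cell).
def Pre_sudoku_grid_correct (sudoku : List (List Int)) : Prop :=
  ∀ k : Fin 3, (∀ j : Fin 3, j < k → pvPresent sudoku (3 * j) ∧ pvCleanFull sudoku (3 * j)) →
    (pvPresent sudoku (3 * k) ∨ pvDupBefore sudoku (3 * k))
instance (sudoku : List (List Int)) : Decidable (Pre_sudoku_grid_correct sudoku) := by
  unfold Pre_sudoku_grid_correct pvPresent pvCleanFull pvDupBefore; infer_instance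

def pvWitness_sudoku_grid_correct : List (List Int) := List.replicate 9 (List.replicate 9 0)

def Spec_sudoku_grid_correct (sudoku : List (List Int)) (out : Bool) : Prop := out = sudoku_grid_correct_alt sudoku
instance (sudoku : List (List Int)) (out : Bool) : Decidable (Spec_sudoku_grid_correct sudoku out) := by unfold Spec_sudoku_grid_correct; infer_instance

-- ===== CLAIM (what is proved, stated in full; the proofs are below) =====
def Claim_equal_sudoku_grid_correct : Prop := ∀ (sudoku : List (List Int)), Dom_sudoku_grid_correct sudoku → Pre_sudoku_grid_correct sudoku → Spec_sudoku_grid_correct sudoku (sudoku_grid_correct sudoku)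

-- ===== LEMMAS AND PROOFS =====


-- A's scan, abstracted: process values one by one against the accumulated list
def pvScan (acc : List Int) : List Int → Option (List Int)
  | [] => some acc
  | v :: vs => if v ∈ acc ∧ v ≠ 0 then none else pvScan (acc ++ [v]) vs

theorem pvFoldA_none (sudoku : List (List Int)) (i : Int) (js : List Int) :
    js.foldl (pvStepA sudoku i) none = none := by
  induction js with
  | nil => rfl
  | cons a t ih => simpa [pvStepA] using ih

theorem pvFoldA_some (sudoku : List (List Int)) (i : Int) (js : List Int) (acc : List Int) :
    js.foldl (pvStepA sudoku i) (some acc) = pvScan acc (js.map (pvCellA sudoku i)) := by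
  induction js generalizing acc with
  | nil => rfl
  | cons a t ih =>
    by_cases h : pvCellA sudoku i a ∈ acc ∧ pvCellA sudoku i a ≠ 0
    · simp [List.foldl_cons, pvStepA, pvScan, h, pvFoldA_none]
    · simp [List.foldl_cons, pvStepA, pvScan, h, ih]

theorem pvScan_append (l1 l2 acc : List Int) :
    pvScan acc (l1 ++ l2) = (pvScan acc l1).bind (fun a => pvScan a l2) := by
  induction l1 generalizing acc with
  | nil => rfl
  | cons v t ih => by_cases h : v ∈ acc ∧ v ≠ 0 <;> simp [pvScan, h, ih]

theorem pvOuterFold_none (sudoku : List (List Int)) (is t : List Int) :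
    t.foldl (fun st i => is.foldl (pvStepA sudoku i) st) none = none := by
  induction t with
  | nil => rfl
  | cons a r ih => simp only [List.foldl_cons, pvFoldA_none]; exact ih

-- the nine cells of the block starting at s, in A's scan order, with pyGetD defaults
def pvNineA (sudoku : List (List Int)) (s : Int) : List Int :=
  (PySem.List.pyRange s (s + 3) 1).flatMap
    (fun i => (PySem.List.pyRange s (s + 3) 1).map (pvCellA sudoku i))

theorem pvBlockA_eq_scan (sudoku : List (List Int)) (s : Int) :
    pvBlockA sudoku s = pvScan [] (pvNineA sudoku s) := by
  unfold pvBlockA pvNineA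
  generalize PySem.List.pyRange s (s + 3) 1 = is
  suffices h : ∀ (l acc : List Int),
      l.foldl (fun st i => is.foldl (pvStepA sudoku i) st) (some acc) =
        pvScan acc (l.flatMap (fun i => is.map (pvCellA sudoku i))) from h is []
  intro l
  induction l with
  | nil => intro acc; rfl
  | cons a t ih =>
    intro acc
    simp only [List.foldl_cons, List.flatMap_cons, pvScan_append]
    rw [pvFoldA_some]
    cases h : pvScan acc (is.map (pvCellA sudoku a)) with
    | none => simp [pvOuterFold_none]
    | some a' => simp [ih]

theorem pvWhile_unroll (sudoku : List (List Int)) :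
    pvWhileA sudoku 0 = ((pvBlockA sudoku 0).isSome &&
      ((pvBlockA sudoku 3).isSome && (pvBlockA sudoku 6).isSome)) := by
  rw [pvWhileA, if_pos (by norm_num : (0:Int) ≤ 6)]
  cases pvBlockA sudoku 0 with
  | none => simp
  | some a =>
    rw [show (0:Int) + 3 = 3 by norm_num, pvWhileA, if_pos (by norm_num : (3:Int) ≤ 6)]
    cases pvBlockA sudoku 3 with
    | none => simp
    | some b =>
      rw [show (3:Int) + 3 = 6 by norm_num, pvWhileA, if_pos (by norm_num : (6:Int) ≤ 6)]
      cases pvBlockA sudoku 6 with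
      | none => simp
      | some c =>
        rw [show (6:Int) + 3 = 9 by norm_num, pvWhileA, if_neg (by norm_num : ¬(9:Int) ≤ 6)]
        simp

-- the coordinate pairs of the block starting at (s, s), in scan order
def pvJs (s : Int) : List (Int × Int) :=
  (PySem.List.pyRange s (s + 3) 1).flatMap (fun i =>
    (PySem.List.pyRange s (s + 3) 1).map (fun j => (i, j)))

theorem pvNine_eq (sudoku : List (List Int)) (s : Int) :
    pvNineA sudoku s = (pvJs s).map (fun ij => pvCellA sudoku ij.1 ij.2) := by
  simp [pvNineA, pvJs, List.map_flatMap, List.map_map, Function.comp_def]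

theorem pvCoords_eq :
    pvCoordsB = (pvJs 0).map (fun ij => (ij.1, ij.2, (0 : Int))) ++
      ((pvJs 3).map (fun ij => (ij.1, ij.2, (1 : Int))) ++
       ((pvJs 6).map (fun ij => (ij.1, ij.2, (2 : Int))) ++ [])) := by decide

-- one block's step on the seen set
def pvStepSeen (sudoku : List (List Int)) (b : Int) (s : PySem.Set (Int × Int))
    (ij : Int × Int) : PySem.Set (Int × Int) :=
  if pvCellA sudoku ij.1 ij.2 ≠ 0 then PySem.Set.add s (b, pvCellA sudoku ij.1 ij.2) else s

theorem pvMem_foldl_tags (sudoku : List (List Int)) (b : Int) (js : List (Int × Int)) :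
    ∀ (seen : PySem.Set (Int × Int)) (p : Int × Int),
    p ∈ js.foldl (pvStepSeen sudoku b) seen → p ∈ seen ∨ p.1 = b := by
  induction js with
  | nil => intro seen p h; exact Or.inl h
  | cons ij t ih =>
    intro seen p h
    rcases ih _ p h with hm | hb
    · unfold pvStepSeen at hm
      split at hm
      · rcases (PySem.Set.mem_add _ _ _).mp hm with hm' | rfl
        · exact Or.inl hm'
        · exact Or.inr rfl
      · exact Or.inl hm
    · exact Or.inr hb

-- walking one block's coordinates = A's scan of that block, with the tag invariant
theorem pvWalk_block (sudoku : List (List Int)) (b : Int) (js : List (Int × Int))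
    (rest : List (Int × Int × Int)) :
    ∀ (acc : List Int) (seen : PySem.Set (Int × Int)),
    (∀ v : Int, ((b, v) ∈ seen) ↔ (v ∈ acc ∧ v ≠ 0)) →
    pvWalkB sudoku ((js.map (fun ij => (ij.1, ij.2, b))) ++ rest) seen =
      (match pvScan acc (js.map (fun ij => pvCellA sudoku ij.1 ij.2)) with
       | none => false
       | some _ => pvWalkB sudoku rest (js.foldl (pvStepSeen sudoku b) seen)) := by
  induction js with
  | nil => intro acc seen _; rfl
  | cons ij t ih =>
    intro acc seen hinv
    obtain ⟨i, j⟩ := ij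
    simp only [List.map_cons, List.cons_append, List.foldl_cons]
    show (if pvCellA sudoku i j ≠ 0 ∧ PySem.Set.contains seen (b, pvCellA sudoku i j) then false
      else pvWalkB sudoku ((t.map (fun ij => (ij.1, ij.2, b))) ++ rest)
        (if pvCellA sudoku i j ≠ 0 then
          PySem.Set.union seen (PySem.Set.ofList [(b, pvCellA sudoku i j)]) else seen)) = _
    have hcond : (pvCellA sudoku i j ≠ 0 ∧ PySem.Set.contains seen (b, pvCellA sudoku i j)) ↔
        (pvCellA sudoku i j ∈ acc ∧ pvCellA sudoku i j ≠ 0) := by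
      rw [show (PySem.Set.contains seen (b, pvCellA sudoku i j) ↔ (b, pvCellA sudoku i j) ∈ seen) from
        ⟨fun h => (PySem.Set.contains_iff _ _).mp h, fun h => (PySem.Set.contains_iff _ _).mpr h⟩,
        hinv (pvCellA sudoku i j)]
      tauto
    by_cases hc : pvCellA sudoku i j ∈ acc ∧ pvCellA sudoku i j ≠ 0
    · rw [if_pos (hcond.mpr hc)]
      simp only [pvScan]
      rw [if_pos hc]
    · rw [if_neg (fun h => hc (hcond.mp h))]
      have hseen : (if pvCellA sudoku i j ≠ 0 then
          PySem.Set.union seen (PySem.Set.ofList [(b, pvCellA sudoku i j)]) else seen) =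
          pvStepSeen sudoku b seen (i, j) := by
        unfold pvStepSeen
        rfl
      rw [hseen]
      have hinv' : ∀ w : Int, ((b, w) ∈ pvStepSeen sudoku b seen (i, j)) ↔
          (w ∈ acc ++ [pvCellA sudoku i j] ∧ w ≠ 0) := by
        intro w
        unfold pvStepSeen
        by_cases h0 : pvCellA sudoku i j = 0
        · rw [if_neg (by simpa using h0), hinv w]
          simp only [List.mem_append, List.mem_singleton]
          constructor
          · rintro ⟨hw, hw0⟩; exact ⟨Or.inl hw, hw0⟩
          · rintro ⟨hw | hw, hw0⟩
            · exact ⟨hw, hw0⟩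
            · exact absurd (hw ▸ h0) hw0
        · rw [if_pos (by simpa using h0), PySem.Set.mem_add, hinv w]
          simp only [List.mem_append, List.mem_singleton, Prod.mk.injEq, true_and]
          constructor
          · rintro (⟨hw, hw0⟩ | rfl)
            · exact ⟨Or.inl hw, hw0⟩
            · exact ⟨Or.inr rfl, h0⟩
          · rintro ⟨hw | rfl, hw0⟩
            · exact Or.inl ⟨hw, hw0⟩
            · exact Or.inr rfl
      rw [ih (acc ++ [pvCellA sudoku i j]) _ hinv']
      simp only [pvScan]
      rw [if_neg hc]

-- ===== VERDICT (by name: the statement is the Claim_ definition above) =====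
theorem sudoku_grid_correct_spec : Claim_equal_sudoku_grid_correct := by
  intro sudoku _ _
  show sudoku_grid_correct sudoku = sudoku_grid_correct_alt sudoku
  unfold sudoku_grid_correct sudoku_grid_correct_alt
  rw [pvWhile_unroll, pvCoords_eq]
  have hb : ∀ s : Int, pvBlockA sudoku s = pvScan [] ((pvJs s).map (fun ij => pvCellA sudoku ij.1 ij.2)) := by
    intro s; rw [pvBlockA_eq_scan, pvNine_eq]
  have inv0 : ∀ v : Int, (((0 : Int), v) ∈ PySem.Set.empty) ↔ (v ∈ ([] : List Int) ∧ v ≠ 0) := by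
    intro v; simp [PySem.Set.empty]
  rw [pvWalk_block sudoku 0 (pvJs 0) _ [] PySem.Set.empty inv0, hb 0, hb 3, hb 6]
  cases hs0 : pvScan [] ((pvJs 0).map (fun ij => pvCellA sudoku ij.1 ij.2)) with
  | none => simp
  | some a0 =>
    simp only [Option.isSome_some, Bool.true_and]
    have inv1 : ∀ v : Int, (((1 : Int), v) ∈ (pvJs 0).foldl (pvStepSeen sudoku 0) PySem.Set.empty) ↔
        (v ∈ ([] : List Int) ∧ v ≠ 0) := by
      intro v
      simp only [List.mem_nil_iff, false_and, iff_false]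
      intro hm
      rcases pvMem_foldl_tags sudoku 0 (pvJs 0) _ _ hm with h | h
      · simp [PySem.Set.empty] at h
      · norm_num at h
    rw [pvWalk_block sudoku 1 (pvJs 3) _ [] _ inv1]
    cases hs1 : pvScan [] ((pvJs 3).map (fun ij => pvCellA sudoku ij.1 ij.2)) with
    | none => simp
    | some a1 =>
      simp only [Option.isSome_some, Bool.true_and]
      have inv2 : ∀ v : Int, (((2 : Int), v) ∈
          (pvJs 3).foldl (pvStepSeen sudoku 1) ((pvJs 0).foldl (pvStepSeen sudoku 0) PySem.Set.empty)) ↔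
          (v ∈ ([] : List Int) ∧ v ≠ 0) := by
        intro v
        simp only [List.mem_nil_iff, false_and, iff_false]
        intro hm
        rcases pvMem_foldl_tags sudoku 1 (pvJs 3) _ _ hm with h | h
        · rcases pvMem_foldl_tags sudoku 0 (pvJs 0) _ _ h with h' | h'
          · simp [PySem.Set.empty] at h'
          · norm_num at h'
        · norm_num at h
      rw [pvWalk_block sudoku 2 (pvJs 6) _ [] _ inv2]
      cases hs2 : pvScan [] ((pvJs 6).map (fun ij => pvCellA sudoku ij.1 ij.2)) with
      | none => simp
      | some a2 => rfl
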